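-- pv_equiv track=rewrite | github.com/uztbt/cp | HackerRank/MeanderingArray.py | meanderingArray
-- ===== SOURCE A (Python) =====
-- def meanderingArray(unsorted):
--     length = len(unsorted)
--     half = len(unsorted) // 2
--     unsorted.sort()  # sorted
--     meandering = []
--     for i in range(half):
--         meandering += [
--             unsorted[-i - 1],
--             unsorted[i],
--         ]
--     if length % 2 == 1:
--         meandering.append(unsorted[half])
--     return meandering
-- ===== SOURCE B (Python) =====
-- def meanderingArray(unsorted):
--     unsorted.sort()
--     n = len(unsorted)
--     out = [0] * n
--     out[::2] = unsorted[n // 2:][::-1]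
--     out[1::2] = unsorted[:n // 2]
--     return out
-- ===== Notes on version B (the rewrite author's own statement) =====
-- stated objective: idiomatic
-- what changed: Replaces A's index-arithmetic loop appending a (high, low) pair per iteration plus a separate odd-length middle append by two extended-slice assignments: even positions get the reversed upper half-slice, odd positions get the lower half-slice, with no interleaving loop and no odd-length branch.
import Mathlib
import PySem

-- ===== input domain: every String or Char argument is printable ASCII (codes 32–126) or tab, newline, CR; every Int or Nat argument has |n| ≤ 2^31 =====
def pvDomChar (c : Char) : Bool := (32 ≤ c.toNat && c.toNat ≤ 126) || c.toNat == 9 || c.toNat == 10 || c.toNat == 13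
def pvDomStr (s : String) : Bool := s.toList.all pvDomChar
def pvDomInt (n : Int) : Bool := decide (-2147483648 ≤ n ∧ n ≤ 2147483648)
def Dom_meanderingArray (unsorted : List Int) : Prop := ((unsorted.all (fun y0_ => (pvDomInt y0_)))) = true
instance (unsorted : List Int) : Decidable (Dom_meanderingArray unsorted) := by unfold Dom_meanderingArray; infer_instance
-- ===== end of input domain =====

-- B builds the result by two extended-slice assignments (even positions = reversed upper
-- half-slice, odd positions = lower half-slice) instead of A's index-arithmetic pair loop
-- with a separate odd-length middle append; equivalence is about the return value
-- (both Pythons sort the argument in place the same way).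

-- ===== PORT A =====
def meanderingArray (unsorted : List Int) : List Int :=
  let length : Int := unsorted.length
  let half : Int := PySem.Int.floordiv (unsorted.length : Int) 2
  let s := PySem.List.sorted unsorted (fun x => x) false
  let meandering := (PySem.List.pyRange 0 half 1).foldl
    (fun acc i => acc ++ [PySem.List.pyGetD s (-i - 1) 0, PySem.List.pyGetD s i 0]) []
  if PySem.Int.mod length 2 = 1 then meandering ++ [PySem.List.pyGetD s half 0]
  else meandering

-- ===== PORT B =====
-- the two extended-slice assignments 'out[::2] = evens; out[1::2] = odds' into a fresh
-- [0]*n list amount exactly to interleaving evens with odds (lengths ⌈n/2⌉ and ⌊n/2⌋ match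
-- the even/odd position counts, as Python's strict extended-slice assignment requires),
-- which PySem has no primitive for; ported by hand as this weave:
def pvWeave (evens odds : List Int) : List Int :=
  match evens, odds with
  | [], _ => []
  | e :: _, [] => [e]
  | e :: es, o :: os => e :: o :: pvWeave es os

def meanderingArray_alt (unsorted : List Int) : List Int :=
  let s := PySem.List.sorted unsorted (fun x => x) false
  let n := s.length
  -- unsorted[n // 2:] is drop (n/2) and [:n // 2] is take (n/2) (slice_from_natCast /
  -- slice_to_natCast: exact for a nonnegative in-range bound); [::-1] is reverse
  pvWeave ((s.drop (n / 2)).reverse) (s.take (n / 2))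

-- ===== PRECONDITION & SPEC =====
def Spec_meanderingArray (unsorted : List Int) (out : List Int) : Prop := out = meanderingArray_alt unsorted
instance (unsorted : List Int) (out : List Int) : Decidable (Spec_meanderingArray unsorted out) := by unfold Spec_meanderingArray; infer_instance

-- ===== CLAIM (what is proved, stated in full; the proofs are below) =====
def Claim_equal_meanderingArray : Prop := ∀ (unsorted : List Int), Dom_meanderingArray unsorted → Spec_meanderingArray unsorted (meanderingArray unsorted)

-- ===== LEMMAS AND PROOFS =====

-- core invariant: A's remaining loop (from k) plus its middle append equals B's weave of
-- the two half-slices with their first k elements dropped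
theorem meander_core (s : List Int) (k : Nat) (hk : k ≤ s.length / 2) :
    (PySem.List.pyRange (k : Int) ((s.length / 2 : Nat) : Int) 1).flatMap
        (fun i => [PySem.List.pyGetD s (-i - 1) 0, PySem.List.pyGetD s i 0])
      ++ (if s.length % 2 = 1 then [PySem.List.pyGetD s ((s.length / 2 : Nat) : Int) 0] else [])
    = pvWeave (((s.drop (s.length / 2)).reverse).drop k) ((s.take (s.length / 2)).drop k) := by
  induction' hm : s.length / 2 - k with m ih generalizing k
  · -- k = half
    have hkh : k = s.length / 2 := by omega
    subst hkh
    rw [PySem.List.pyRange_one_eq_nil (by omega), List.flatMap_nil, List.nil_append]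
    have hodrop : ((s.take (s.length / 2)).drop (s.length / 2)) = [] := by
      apply List.drop_eq_nil_of_le; simp
    by_cases hodd : s.length % 2 = 1
    · have hlen : ((s.drop (s.length / 2)).reverse).length = s.length / 2 + 1 := by
        simp; omega
      have hlt : s.length / 2 < ((s.drop (s.length / 2)).reverse).length := by omega
      rw [List.drop_eq_getElem_cons hlt, hodrop]
      have hnil : (((s.drop (s.length / 2)).reverse).drop (s.length / 2 + 1)) = [] := by
        apply List.drop_eq_nil_of_le; omega
      rw [hnil, if_pos hodd]
      have he : ((s.drop (s.length / 2)).reverse)[s.length / 2] = s[s.length / 2]'(by omega) := by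
        rw [List.getElem_reverse, List.getElem_drop]
        simp only [List.length_drop]; congr 1; omega
      rw [PySem.List.pyGetD_natCast, List.getD_eq_getElem _ _ (by omega), he, pvWeave]
    · have hnil : (((s.drop (s.length / 2)).reverse).drop (s.length / 2)) = [] := by
        apply List.drop_eq_nil_of_le; simp; omega
      rw [hnil, hodrop, if_neg hodd, pvWeave]
  · -- k < half: peel one pair
    have hklt : k < s.length / 2 := by omega
    have hEl : ((s.drop (s.length / 2)).reverse).length = s.length - s.length / 2 := by simp
    have hkE : k < ((s.drop (s.length / 2)).reverse).length := by omega
    have hkO : k < ((s.take (s.length / 2))).length := by simp; omega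
    rw [List.drop_eq_getElem_cons hkE, List.drop_eq_getElem_cons hkO, pvWeave,
      PySem.List.pyRange_one_cons (by omega), List.flatMap_cons]
    have he : ((s.drop (s.length / 2)).reverse)[k] = s[s.length - 1 - k]'(by omega) := by
      rw [List.getElem_reverse, List.getElem_drop]
      simp only [List.length_drop]; congr 1; omega
    have ho : (s.take (s.length / 2))[k] = s[k]'(by omega) := by
      rw [List.getElem_take]
    have e1 : PySem.List.pyGetD s (-(k : Int) - 1) 0 = s[s.length - 1 - k]'(by omega) := by
      have hx : -(k : Int) - 1 = -(((k + 1 : Nat) : Int)) := by push_cast; ring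
      rw [hx, PySem.List.pyGetD_neg_natCast _ _ _ (by omega) (by omega)]
      congr 1; omega
    have e2 : PySem.List.pyGetD s ((k : Int)) 0 = s[k]'(by omega) := by
      rw [PySem.List.pyGetD_natCast, List.getD_eq_getElem _ _ (by omega)]
    have hcast : ((k : Int) + 1) = ((k + 1 : Nat) : Int) := by push_cast; ring
    rw [e1, e2, he, ho, hcast, ← ih (k + 1) (by omega) (by omega)]
    simp

-- ===== VERDICT (by name: the statement is the Claim_ definition above) =====
theorem meanderingArray_spec : Claim_equal_meanderingArray := by
  intro unsorted _
  unfold Spec_meanderingArray meanderingArray meanderingArray_alt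
  simp only
  set s := PySem.List.sorted unsorted (fun x => x) false with hs
  have hlen : s.length = unsorted.length := PySem.List.length_sorted ..
  rw [PySem.List.foldl_append_eq_flatMap, List.nil_append]
  have hhalf : PySem.Int.floordiv (unsorted.length : Int) 2 = ((s.length / 2 : Nat) : Int) := by
    rw [hlen]; exact_mod_cast PySem.Int.floordiv_natCast unsorted.length 2
  have hmod : PySem.Int.mod (unsorted.length : Int) 2 = ((s.length % 2 : Nat) : Int) := by
    rw [hlen]; exact_mod_cast PySem.Int.mod_natCast unsorted.length 2
  have core := meander_core s 0 (Nat.zero_le _)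
  rw [hhalf, hmod]
  by_cases hodd : s.length % 2 = 1
  · rw [if_pos (by omega)]
    simpa [hodd] using core
  · rw [if_neg (by omega)]
    simpa [hodd] using core
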